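-- pv_equiv track=rewrite | github.com/ArtemBabaiev/Uni_Comp_Discrete_Math | Lab4/functions.py | del_repit
-- ===== SOURCE A (Python) =====
-- def del_repit(arr):
--     for subarr in arr:
--         for i in range(len(subarr)):
--             temp = subarr.pop(i)
--             if not temp in subarr:
--                 subarr.insert(i, temp)
--             else:
--                 subarr.insert(i, "")
--     return arr
-- ===== SOURCE B (Python) =====
-- def del_repit(arr):
--     # One reverse pass per subarray with a seen-set: blank every element whose
--     # value reappears later (i.e. keep only the last occurrence of each value).
--     for subarr in arr:
--         seen = set()
--         for i in range(len(subarr) - 1, -1, -1):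
--             v = subarr[i]
--             if v in seen:
--                 subarr[i] = ""
--             else:
--                 seen.add(v)
--     return arr
-- ===== Notes on version B (the rewrite author's own statement) =====
-- stated objective: faster
-- what changed: A pops each element and scans the rest of the subarray for a duplicate (quadratic per subarray); B makes a single reverse pass per subarray with a seen-set, blanking every element whose value reappears later.
import Mathlib
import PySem

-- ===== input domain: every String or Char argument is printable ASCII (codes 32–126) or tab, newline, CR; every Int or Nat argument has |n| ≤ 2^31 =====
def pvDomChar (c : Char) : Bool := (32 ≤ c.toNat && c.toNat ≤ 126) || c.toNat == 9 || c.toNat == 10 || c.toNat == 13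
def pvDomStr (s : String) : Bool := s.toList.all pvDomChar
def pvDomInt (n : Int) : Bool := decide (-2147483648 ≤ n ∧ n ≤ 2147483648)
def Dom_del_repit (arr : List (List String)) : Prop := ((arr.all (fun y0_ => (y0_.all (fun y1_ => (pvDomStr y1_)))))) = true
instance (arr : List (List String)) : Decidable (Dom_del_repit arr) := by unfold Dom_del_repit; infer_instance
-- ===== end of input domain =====

-- B replaces A's quadratic pop/membership/insert loop by a single reverse pass per
-- subarray with a seen-set (keep the last occurrence of each value, blank the rest).
-- Both Pythons mutate the subarrays in place and return arr; the equivalence proved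
-- here is about the returned value (B performs the same in-place mutation).

-- ===== PORT A =====
-- inner loop of A over one subarray: for i in range(len(subarr)): pop / test / insert
-- (the 'none' branch of pop? is unreachable — a totality guard only)
def rowA (subarr : List String) : List String :=
  (PySem.List.pyRange 0 (subarr.length : Int) 1).foldl
    (fun s i =>
      match PySem.List.pop? s i with
      | some (temp, rest) =>
        if temp ∉ rest then PySem.List.insert rest i temp
        else PySem.List.insert rest i ""
      | none => s)
    subarr

def del_repit (arr : List (List String)) : List (List String) :=
  arr.map rowA

-- ===== PORT B =====
-- B's descending index loop reads/writes only index i at step i; it is ported as a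
-- right fold rebuilding the list right-to-left with the same seen-set (exact).
def rowB (subarr : List String) : List String :=
  (subarr.foldr
    (fun v acc =>
      if PySem.Set.contains acc.1 v then (acc.1, "" :: acc.2)
      else (PySem.Set.add acc.1 v, v :: acc.2))
    ((PySem.Set.empty : PySem.Set String), ([] : List String))).2

def del_repit_alt (arr : List (List String)) : List (List String) :=
  arr.map rowB

-- ===== PRECONDITION & SPEC =====
def Spec_del_repit (arr : List (List String)) (out : List (List String)) : Prop := out = del_repit_alt arr
instance (arr : List (List String)) (out : List (List String)) : Decidable (Spec_del_repit arr out) := by unfold Spec_del_repit; infer_instance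

-- ===== CLAIM (what is proved, stated in full; the proofs are below) =====
def Claim_equal_del_repit : Prop := ∀ (arr : List (List String)), Dom_del_repit arr → Spec_del_repit arr (del_repit arr)

-- ===== LEMMAS AND PROOFS =====

-- the common specification: element i is blanked iff its value reappears later
def specRow : List String → List String
  | [] => []
  | v :: t => (if v ∈ t then "" else v) :: specRow t

theorem length_specRow (l : List String) : (specRow l).length = l.length := by
  induction l with
  | nil => rfl
  | cons v t ih => simp [specRow, ih]

theorem getElem_specRow (l : List String) (j : Nat) (h : j < l.length) :
    (specRow l)[j]'(by simpa [length_specRow] using h) =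
      if l[j] ∈ l.drop (j+1) then "" else l[j] := by
  induction l generalizing j with
  | nil => simp at h
  | cons v t ih =>
    cases j with
    | zero => simp [specRow]
    | succ j => simpa [specRow] using ih j (by simpa using h)

-- B's inner loop computes specRow
def bstep (v : String) (acc : PySem.Set String × List String) : PySem.Set String × List String :=
  if PySem.Set.contains acc.1 v then (acc.1, "" :: acc.2)
  else (PySem.Set.add acc.1 v, v :: acc.2)

theorem rowB_eq_foldr_bstep (l : List String) :
    rowB l = (l.foldr bstep ((PySem.Set.empty : PySem.Set String), ([] : List String))).2 := rfl

theorem foldr_bstep_spec (l : List String) :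
    (∀ x : String, x ∈ (l.foldr bstep ((PySem.Set.empty : PySem.Set String), ([] : List String))).1 ↔ x ∈ l) ∧
    (l.foldr bstep ((PySem.Set.empty : PySem.Set String), ([] : List String))).2 = specRow l := by
  induction l with
  | nil => simp [PySem.Set.empty, specRow]
  | cons v t ih =>
    obtain ⟨hmem, hout⟩ := ih
    rw [List.foldr_cons]
    by_cases hv : v ∈ t
    · have hc : PySem.Set.contains (t.foldr bstep ((PySem.Set.empty : PySem.Set String), ([] : List String))).1 v = true := by
        rw [PySem.Set.contains_iff]; exact (hmem v).mpr hv
      rw [bstep, if_pos hc]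
      refine ⟨fun x => ?_, ?_⟩
      · rw [hmem x, List.mem_cons]
        constructor
        · exact Or.inr
        · rintro (rfl | h)
          · exact hv
          · exact h
      · simp only [specRow, if_pos hv, hout]
    · have hc : ¬ PySem.Set.contains (t.foldr bstep ((PySem.Set.empty : PySem.Set String), ([] : List String))).1 v = true := by
        rw [PySem.Set.contains_iff]; intro h; exact hv ((hmem v).mp h)
      rw [bstep, if_neg hc]
      refine ⟨fun x => ?_, ?_⟩
      · rw [PySem.Set.mem_add, hmem x, List.mem_cons]
        tauto
      · simp only [specRow, if_neg hv, hout]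

theorem rowB_eq_specRow (l : List String) : rowB l = specRow l := by
  rw [rowB_eq_foldr_bstep]; exact (foldr_bstep_spec l).2

-- key fact for A: a non-blank value kept in the processed prefix cannot reappear
theorem mem_take_specRow (l : List String) (k : Nat) (v : String)
    (hv : v ∈ (specRow l).take k) :
    v = "" ∨ ∃ j, ∃ hj : j < l.length, j < k ∧ l[j] = v ∧ l[j] ∉ l.drop (j+1) := by
  obtain ⟨j, hjk, hgv⟩ := List.getElem_of_mem hv
  have hjlt : j < l.length := by
    have h := hjk; simp [List.length_take, length_specRow] at h; omega
  have hjk' : j < k := by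
    have h := hjk; simp [List.length_take] at h; omega
  rw [List.getElem_take] at hgv
  rw [getElem_specRow l j hjlt] at hgv
  by_cases hmem : l[j] ∈ l.drop (j+1)
  · left; rw [if_pos hmem] at hgv; exact hgv.symm
  · right
    refine ⟨j, hjlt, hjk', ?_, hmem⟩
    rw [if_neg hmem] at hgv; exact hgv

-- erasing the middle element of an append (used for A's pop at index k)
theorem eraseIdx_append_middle {α : Type} (a b : List α) (v : α) :
    (a ++ v :: b).eraseIdx a.length = a ++ b := by
  induction a with
  | nil => simp
  | cons x xs ih => simpa [List.eraseIdx_cons_succ] using ih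

theorem mem_drop_of_lt (l : List String) (j k : Nat) (hj : j < k) (hk : k < l.length) :
    l[k] ∈ l.drop (j+1) := by
  rw [List.mem_iff_getElem]
  exact ⟨k - (j+1), by simp; omega, by rw [List.getElem_drop]; congr 1; omega⟩

-- the invariant of A's fold: after the first k iterations the state is the
-- already-blanked prefix followed by the untouched suffix
theorem rowA_invariant (l : List String) (k : Nat) (hk : k ≤ l.length) :
    (PySem.List.pyRange (k : Int) (l.length : Int) 1).foldl
      (fun s i =>
        match PySem.List.pop? s i with
        | some (temp, rest) =>
          if temp ∉ rest then PySem.List.insert rest i temp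
          else PySem.List.insert rest i ""
        | none => s)
      ((specRow l).take k ++ l.drop k) = specRow l := by
  induction hn : l.length - k generalizing k with
  | zero =>
    have hkn : k = l.length := by omega
    rw [PySem.List.pyRange_one_eq_nil (by exact_mod_cast Nat.le_of_eq hkn.symm)]
    rw [List.foldl_nil, hkn, List.drop_length, List.append_nil,
      List.take_of_length_le (by rw [length_specRow])]
  | succ m ih =>
    have hklt : k < l.length := by omega
    rw [PySem.List.pyRange_one_cons (by exact_mod_cast hklt)]
    rw [List.foldl_cons]
    set v := l[k] with hv
    have hdrop : l.drop k = v :: l.drop (k+1) := List.drop_eq_getElem_cons hklt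
    set a := (specRow l).take k with ha
    have hal : a.length = k := by
      rw [ha]; simp [List.length_take, length_specRow]; omega
    rw [hdrop]
    have hlen : k < (a ++ v :: l.drop (k+1)).length := by simp [hal]
    have hpop : PySem.List.pop? (a ++ v :: l.drop (k+1)) (k : Int) =
        some ((a ++ v :: l.drop (k+1))[k], (a ++ v :: l.drop (k+1)).eraseIdx k) :=
      PySem.List.pop?_natCast _ k hlen
    have hget : (a ++ v :: l.drop (k+1))[k]'hlen = v :=
      List.getElem_of_append rfl hal
    have herase : (a ++ v :: l.drop (k+1)).eraseIdx k = a ++ l.drop (k+1) := by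
      have h := eraseIdx_append_middle a (l.drop (k+1)) v
      rw [hal] at h; exact h
    have hspec : (specRow l)[k]'(by rw [length_specRow]; exact hklt) =
        if v ∈ l.drop (k+1) then "" else v := getElem_specRow l k hklt
    have hins : ∀ x : String, PySem.List.insert (a ++ l.drop (k+1)) (k : Int) x =
        a ++ x :: l.drop (k+1) := by
      intro x
      rw [PySem.List.insert_natCast (a ++ l.drop (k+1)) k x (by simp [hal])]
      rw [← hal, List.take_left, List.drop_left]
    have hred : (match PySem.List.pop? (a ++ v :: l.drop (k+1)) ((k : Int)) with
        | some (temp, rest) =>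
          if temp ∉ rest then PySem.List.insert rest ((k : Int)) temp
          else PySem.List.insert rest ((k : Int)) ""
        | none => a ++ v :: l.drop (k+1)) =
        (specRow l).take (k+1) ++ l.drop (k+1) := by
      rw [hpop]
      dsimp only
      rw [hget, herase]
      have htake : (specRow l).take (k+1) =
          a ++ [(specRow l)[k]'(by rw [length_specRow]; exact hklt)] :=
        List.take_succ_eq_append_getElem (by rw [length_specRow]; exact hklt)
      rw [htake, List.append_assoc, List.singleton_append]
      by_cases hb : v ∈ l.drop (k+1)
      · rw [if_neg (by simp [hb]), hins, hspec, if_pos hb]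
      · by_cases hain : v ∈ a
        · -- v occurs in the processed prefix: it must be the blank string
          have hvblank : v = "" := by
            rcases mem_take_specRow l k v (by rw [← ha]; exact hain) with h | ⟨j, hj, hjk, hlj, hnot⟩
            · exact h
            · exact absurd (by rw [hlj, hv]; exact mem_drop_of_lt l j k hjk hklt) hnot
          rw [if_neg (by simp [hain]), hins, hspec, if_neg hb, ← hvblank]
        · rw [if_pos (by simp [hain, hb]), hins, hspec, if_neg hb]
    rw [hred]
    have hcast : ((k : Int) + 1) = ((k + 1 : Nat) : Int) := by push_cast; ring
    rw [hcast]
    exact ih (k+1) hklt (by omega)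

theorem rowA_eq_specRow (l : List String) : rowA l = specRow l := by
  have := rowA_invariant l 0 (Nat.zero_le _)
  simpa [rowA] using this

-- ===== VERDICT (by name: the statement is the Claim_ definition above) =====
theorem del_repit_spec : Claim_equal_del_repit := by
  intro arr _
  unfold Spec_del_repit del_repit del_repit_alt
  exact List.map_congr_left (fun l _ => by rw [rowA_eq_specRow, rowB_eq_specRow])
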